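-- pv_equiv track=rewrite | github.com/cguccione/human_host_filtration | scripts/hf_filter_pmls.py | calculate_run_lengths
-- ===== SOURCE A (Python) =====
-- def calculate_run_lengths(pml_values):
--     runs = []
--     current_run = 0
--     for score in pml_values:
--         if score == 0:
--             if current_run > 0:
--                 runs.append(current_run)
--             current_run = 0
--         else:
--             current_run = max(current_run, score)
--     if current_run > 0:
--         runs.append(current_run)
--     return runs
-- ===== SOURCE B (Python) =====
-- def calculate_run_lengths(pml_values):
--     # Partition into maximal non-zero runs; append the max of each run if positive.
--     runs = []
--     i = 0
--     n = len(pml_values)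
--     while i < n:
--         if pml_values[i] == 0:
--             i += 1
--             continue
--         j = i
--         while j < n and pml_values[j] != 0:
--             j += 1
--         m = max(pml_values[i:j])
--         if m > 0:
--             runs.append(m)
--         i = j
--     return runs
-- ===== Notes on version B (the rewrite author's own statement) =====
-- stated objective: alternative
-- what changed: Replaces A's single-pass running-max accumulator with zero-boundary flushing by a partition-then-reduce scan: find each maximal non-zero run, take max of the run slice, append it if positive.
import Mathlib
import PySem

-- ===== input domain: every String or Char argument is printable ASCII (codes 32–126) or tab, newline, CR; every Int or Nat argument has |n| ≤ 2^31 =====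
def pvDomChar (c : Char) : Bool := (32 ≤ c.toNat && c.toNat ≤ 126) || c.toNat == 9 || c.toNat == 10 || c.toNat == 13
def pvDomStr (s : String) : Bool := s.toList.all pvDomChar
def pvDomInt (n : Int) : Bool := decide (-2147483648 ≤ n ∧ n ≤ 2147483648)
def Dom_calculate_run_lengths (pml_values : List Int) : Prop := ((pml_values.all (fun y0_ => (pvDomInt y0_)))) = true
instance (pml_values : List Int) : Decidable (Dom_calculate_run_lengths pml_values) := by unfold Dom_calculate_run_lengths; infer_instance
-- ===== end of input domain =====

-- B replaces A's running-max accumulator with a partition-into-runs-then-reduce scan; same O(n) cost (objective: alternative).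

-- ===== PORT A =====
-- A's loop: state (runs, current_run); on 0 flush current_run if positive, else keep running max.
def calculate_run_lengths (pml_values : List Int) : List Int :=
  let s := pml_values.foldl
    (fun (st : List Int × Int) score =>
      if score = 0 then
        (if st.2 > 0 then st.1 ++ [st.2] else st.1, 0)
      else
        (st.1, max st.2 score))
    ([], 0)
  if s.2 > 0 then s.1 ++ [s.2] else s.1

-- ===== PORT B =====
-- B's outer while-loop: skip a zero, or take the whole non-zero run (inner scan = takeWhile,
-- advance i to j = dropWhile), append the run's max if positive.
def pvAltGo : List Int → List Int
  | [] => []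
  | x :: xs =>
    if x = 0 then pvAltGo xs
    else
      let m := (xs.takeWhile (fun v => v != 0)).foldl max x
      let rest := pvAltGo (xs.dropWhile (fun v => v != 0))
      if m > 0 then m :: rest else rest
termination_by l => l.length
decreasing_by
  · simp
  · exact Nat.lt_succ_of_le (List.length_dropWhile_le _ _)

def calculate_run_lengths_alt (pml_values : List Int) : List Int :=
  pvAltGo pml_values

-- ===== PRECONDITION & SPEC =====
def Spec_calculate_run_lengths (pml_values : List Int) (out : List Int) : Prop := out = calculate_run_lengths_alt pml_values
instance (pml_values : List Int) (out : List Int) : Decidable (Spec_calculate_run_lengths pml_values out) := by unfold Spec_calculate_run_lengths; infer_instance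

-- ===== CLAIM (what is proved, stated in full; the proofs are below) =====
def Claim_equal_calculate_run_lengths : Prop := ∀ (pml_values : List Int), Dom_calculate_run_lengths pml_values → Spec_calculate_run_lengths pml_values (calculate_run_lengths pml_values)

-- ===== LEMMAS AND PROOFS =====

-- Abstract form of A's fold: pvG cur l processes l with running max cur.
def pvG : Int → List Int → List Int
  | cur, [] => if cur > 0 then [cur] else []
  | cur, x :: xs =>
    if x = 0 then (if cur > 0 then cur :: pvG 0 xs else pvG 0 xs)
    else pvG (max cur x) xs

theorem pvFoldl_eq_pvG (l : List Int) : ∀ (runs : List Int) (cur : Int),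
    (let s := l.foldl
      (fun (st : List Int × Int) score =>
        if score = 0 then
          (if st.2 > 0 then st.1 ++ [st.2] else st.1, 0)
        else
          (st.1, max st.2 score))
      (runs, cur);
     if s.2 > 0 then s.1 ++ [s.2] else s.1) = runs ++ pvG cur l := by
  induction l with
  | nil => intro runs cur; simp [pvG]; split <;> simp
  | cons x xs ih =>
    intro runs cur
    simp only [List.foldl_cons, pvG]
    by_cases hx : x = 0
    · simp only [hx, if_true]
      by_cases hc : cur > 0
      · simp only [hc, if_true]
        rw [ih]; simp
      · simp only [hc, if_false]
        rw [ih]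
    · simp only [hx, if_false]
      rw [ih]

theorem pvFoldl_max (t : List Int) : ∀ (a b : Int),
    t.foldl max (max a b) = max a (t.foldl max b) := by
  induction t with
  | nil => intro a b; simp
  | cons c t ih =>
    intro a b
    simp only [List.foldl_cons]
    rw [max_assoc, ih]

-- pvG folds max over the leading non-zero block.
theorem pvG_run (xs : List Int) : ∀ (cur : Int),
    pvG cur xs
      = pvG ((xs.takeWhile (fun v => v != 0)).foldl max cur)
            (xs.dropWhile (fun v => v != 0)) := by
  induction xs with
  | nil => intro cur; simp
  | cons x xs ih =>
    intro cur
    by_cases hx : x = 0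
    · simp [hx]
    · have hb : (fun v => v != 0) x = true := by simp [hx]
      simp only [List.takeWhile_cons, List.dropWhile_cons, hb, if_true, List.foldl_cons]
      rw [pvG, if_neg hx, ih]

theorem pvDropWhile_head (xs : List Int) : ∀ (y : Int) (r : List Int),
    xs.dropWhile (fun v => v != 0) = y :: r → y = 0 := by
  induction xs with
  | nil => intro y r h; simp at h
  | cons x xs ih =>
    intro y r h
    by_cases hx : x = 0
    · rw [List.dropWhile_cons] at h
      simp [hx] at h
      omega
    · rw [List.dropWhile_cons] at h
      simp [hx] at h
      exact ih y r h

theorem pvG_eq_altGo : ∀ (n : ℕ) (l : List Int), l.length ≤ n → pvG 0 l = pvAltGo l := by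
  intro n
  induction n with
  | zero =>
    intro l hl
    have : l = [] := List.eq_nil_of_length_eq_zero (Nat.le_zero.mp hl)
    subst this; simp [pvG, pvAltGo]
  | succ n ih =>
    intro l hl
    match l with
    | [] => simp [pvG, pvAltGo]
    | x :: xs =>
      simp only [List.length_cons, Nat.succ_le_succ_iff] at hl
      by_cases hx : x = 0
      · rw [pvG, if_pos hx]
        simp only [gt_iff_lt, lt_irrefl, if_false]
        rw [pvAltGo, if_pos hx, ih xs hl]
      · rw [pvG, if_neg hx, pvG_run, pvFoldl_max, pvAltGo, if_neg hx]
        dsimp only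
        cases hre : xs.dropWhile (fun v => v != 0) with
        | nil =>
          rw [pvG]
          simp only [pvAltGo]
          by_cases hmp : (xs.takeWhile (fun v => v != 0)).foldl max x > 0
          · rw [if_pos hmp, if_pos (by omega : max 0 ((xs.takeWhile (fun v => v != 0)).foldl max x) > 0),
                max_eq_right (le_of_lt hmp)]
          · rw [if_neg hmp, if_neg (by omega : ¬ max 0 ((xs.takeWhile (fun v => v != 0)).foldl max x) > 0)]
        | cons y r' =>
          have hy : y = 0 := pvDropWhile_head xs y r' hre
          subst hy
          have hr'len : r'.length ≤ n := by
            have := List.length_dropWhile_le (fun v => v != 0) xs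
            rw [hre] at this; simp at this; omega
          rw [pvG, if_pos rfl, ih r' hr'len]
          have haltr : pvAltGo (0 :: r') = pvAltGo r' := by simp [pvAltGo]
          rw [haltr]
          by_cases hmp : (xs.takeWhile (fun v => v != 0)).foldl max x > 0
          · rw [if_pos hmp, if_pos (by omega : max 0 ((xs.takeWhile (fun v => v != 0)).foldl max x) > 0),
                max_eq_right (le_of_lt hmp)]
          · rw [if_neg hmp, if_neg (by omega : ¬ max 0 ((xs.takeWhile (fun v => v != 0)).foldl max x) > 0)]

-- ===== VERDICT (by name: the statement is the Claim_ definition above) =====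
theorem calculate_run_lengths_spec : Claim_equal_calculate_run_lengths := by
  intro l _
  unfold Spec_calculate_run_lengths calculate_run_lengths calculate_run_lengths_alt
  rw [pvFoldl_eq_pvG]
  simp [pvG_eq_altGo l.length l (le_refl _)]
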